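-- pv_equiv track=rewrite | github.com/earlbread/hackerrank | array-splitting/array-splitting.py | solution
-- ===== SOURCE A (Python) =====
-- def solution(A):
--     if len(A) < 2:
--         return 0
--     split_index = -1
--     score = 0
--     left = 0
--
--     right = sum(A)
--     for i in range(len(A)):
--         left += A[i]
--         right -= A[i]
--
--         if left == right:
--             split_index = i + 1
--             score += 1
--             break
--
--     if split_index != -1:
--         score += max(solution(A[:split_index]), solution(A[split_index:]))
--     return score
-- ===== SOURCE B (Python) =====
-- def solution(A):
--     # Iterative level-by-level sweep instead of recursion: keep a frontier of
--     # segments; each round every segment splits at its first balanced interior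
--     # point; the answer is the number of rounds performed (no recursion, no max).
--     prefix = [0]
--     for x in A:
--         prefix.append(prefix[-1] + x)
--
--     def first_split(lo, hi):
--         if hi - lo < 2:
--             return None
--         t = prefix[lo] + prefix[hi]
--         for k in range(lo + 1, hi):
--             if 2 * prefix[k] == t:
--                 return k
--         return None
--
--     score = 0
--     frontier = [(0, len(A))]
--     while frontier:
--         nxt = []
--         for lo, hi in frontier:
--             k = first_split(lo, hi)
--             if k is not None:
--                 nxt.append((lo, k))
--                 nxt.append((k, hi))
--         if not nxt:
--             break
--         score += 1
--         frontier = nxt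
--     return score
-- ===== Notes on version B (the rewrite author's own statement) =====
-- stated objective: alternative
-- what changed: B replaces A's recursion-with-max over freshly copied slices by an iterative level-by-level sweep: prefix sums built once, a frontier list of index segments, each round splitting every segment at its first balanced interior point, the answer being the number of rounds performed.
-- crash fix: On lists of length >= 2 with total sum 0 that are not all zeros, A eventually recurses on an identical slice and raises RecursionError; B returns the number of balanced-split rounds it finds (0 on [1, -1]). — e.g. on solution([1, -1]): A raises RecursionError, B returns 0
import Mathlib
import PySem

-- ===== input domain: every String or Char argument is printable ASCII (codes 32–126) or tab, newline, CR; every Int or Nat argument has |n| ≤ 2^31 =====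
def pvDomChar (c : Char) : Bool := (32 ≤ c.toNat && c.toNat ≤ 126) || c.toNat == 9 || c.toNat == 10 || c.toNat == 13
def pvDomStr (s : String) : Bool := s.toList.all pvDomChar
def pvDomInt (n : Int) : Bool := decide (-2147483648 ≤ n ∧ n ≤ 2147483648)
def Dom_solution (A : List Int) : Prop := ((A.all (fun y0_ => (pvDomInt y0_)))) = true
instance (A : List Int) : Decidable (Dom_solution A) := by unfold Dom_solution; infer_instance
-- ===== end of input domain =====

-- B replaces A's recursion with max over freshly copied slices by an iterative
-- level-by-level sweep over a frontier of index segments (prefix sums built once);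
-- the answer is the number of rounds in which some segment split (objective: alternative).

-- ===== PORT A =====
-- A's `for i in range(len(A))` loop with break: recursion over the remaining
-- elements carrying `left`, `right` and the running index `i`; returns Python's
-- final `split_index` (`some (i+1)` on break, `none` when the loop falls through).
def aLoop : List Int → Int → Int → Nat → Option Nat
  | [], _, _, _ => none
  | x :: rest, left, right, i =>
    let left := left + x
    let right := right - x
    if left = right then some (i + 1) else aLoop rest left right (i + 1)

-- A's recursion does not terminate when split_index = len(A) (then A[:split_index]
-- is A itself; Python raises RecursionError there), so the port is fuel-guarded;
-- fuel A.length + 1 suffices on Pre_solution (proved below).  A[:k] / A[k:] with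
-- 0 ≤ k ≤ len(A) are exactly List.take k / List.drop k.
def solutionF : Nat → List Int → Int
  | 0, _ => 0
  | fuel + 1, A =>
    if A.length < 2 then 0
    else
      match aLoop A 0 A.sum 0 with
      | none => 0
      | some k => 1 + max (solutionF fuel (A.take k)) (solutionF fuel (A.drop k))

def solution (A : List Int) : Int := solutionF (A.length + 1) A

-- ===== PORT B =====
-- prefix = [0]; for x in A: prefix.append(prefix[-1] + x)
def buildP (A : List Int) : List Int :=
  A.foldl (fun P x => P ++ [P.getLastD 0 + x]) [0]

-- first_split's `for k in range(lo+1, hi)` with early return: recursion on the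
-- number cnt of indices still to scan (called with cnt = hi - (lo+1)); P[k] with
-- 0 ≤ k < len(P) is exactly getD.
def bScan (P : List Int) : Nat → Nat → Int → Option Nat
  | _, 0, _ => none
  | i, cnt + 1, t =>
    if 2 * P.getD i 0 = t then some i else bScan P (i + 1) cnt t

-- def first_split(lo, hi)
def firstSplit (P : List Int) (lo hi : Nat) : Option Nat :=
  if hi - lo < 2 then none
  else bScan P (lo + 1) (hi - (lo + 1)) (P.getD lo 0 + P.getD hi 0)

-- the inner `for lo, hi in frontier` loop building nxt
def bStep (P : List Int) (frontier : List (Nat × Nat)) : List (Nat × Nat) :=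
  frontier.foldl (fun nxt seg =>
    match firstSplit P seg.1 seg.2 with
    | none => nxt
    | some k => nxt ++ [(seg.1, k), (k, seg.2)]) []

-- the `while frontier` loop; fuel-guarded only to make the recursion structural
-- (B's Python loop terminates: segment lengths shrink each round; fuel
-- A.length + 1 always suffices, proved below).
def bfs (P : List Int) : Nat → List (Nat × Nat) → Int → Int
  | 0, _, score => score
  | fuel + 1, frontier, score =>
    if frontier.isEmpty then score
    else
      let nxt := bStep P frontier
      if nxt.isEmpty then score else bfs P fuel nxt (score + 1)

def solution_alt (A : List Int) : Int :=
  bfs (buildP A) (A.length + 1) [(0, A.length)] 0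

-- ===== PRECONDITION & SPEC =====
-- Pre_ excludes exactly the inputs on which A raises RecursionError (it recurses on
-- an identical slice): lists of length ≥ 2 with total sum 0 that are not all zeros.
def Pre_solution (A : List Int) : Prop :=
  A.sum ≠ 0 ∨ A.length < 2 ∨ ∀ x ∈ A, x = 0
instance (A : List Int) : Decidable (Pre_solution A) := by unfold Pre_solution; infer_instance

def pvWitness_solution : List Int := [2, 1, 1]

-- A raises RecursionError on lists of length ≥ 2 with total sum 0 that are not all
-- zeros (it recurses on an identical slice); B returns the split count it finds there.
def Raises_solution (A : List Int) : Prop :=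
  A.sum = 0 ∧ 2 ≤ A.length ∧ ¬ ∀ x ∈ A, x = 0
instance (A : List Int) : Decidable (Raises_solution A) := by unfold Raises_solution; infer_instance
def pvRaiseWitness_solution : List Int := [1, -1]
def pvRaiseWitnessOut_solution : Int := 0

def Spec_solution (A : List Int) (out : Int) : Prop := out = solution_alt A
instance (A : List Int) (out : Int) : Decidable (Spec_solution A out) := by unfold Spec_solution; infer_instance

-- ===== CLAIM (what is proved, stated in full; the proofs are below) =====
def Claim_equal_solution : Prop := ∀ (A : List Int), Dom_solution A → Pre_solution A → Spec_solution A (solution A)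
def Claim_raises_solution : Prop := (∀ (A : List Int), Dom_solution A → Raises_solution A → ¬ Pre_solution A) ∧ (Dom_solution (pvRaiseWitness_solution) ∧ Raises_solution (pvRaiseWitness_solution) ∧ solution_alt (pvRaiseWitness_solution) = pvRaiseWitnessOut_solution)

-- ===== LEMMAS AND PROOFS =====

-- proof-only helper: the prefix-sum list starting from s
def scanlAdd (s : Int) : List Int → List Int
  | [] => [s]
  | x :: rest => s :: scanlAdd (s + x) rest

theorem buildP_foldl (A : List Int) : ∀ (pre : List Int) (s : Int),
    A.foldl (fun P x => P ++ [P.getLastD 0 + x]) (pre ++ [s]) = pre ++ scanlAdd s A := by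
  induction A with
  | nil => intro pre s; simp [scanlAdd]
  | cons x rest ih =>
    intro pre s
    have h1 : (pre ++ [s]).getLastD 0 = s := by simp
    simp only [List.foldl_cons, h1]
    have := ih (pre ++ [s]) (s + x)
    rw [this]
    simp [scanlAdd]

theorem buildP_eq (A : List Int) : buildP A = scanlAdd 0 A := by
  have := buildP_foldl A [] 0
  simpa [buildP] using this

theorem scanlAdd_getD (A : List Int) : ∀ (s : Int) (i : Nat), i ≤ A.length →
    (scanlAdd s A).getD i 0 = s + (A.take i).sum := by
  induction A with
  | nil =>
    intro s i hi
    have h0 : i = 0 := by simpa using hi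
    subst h0; simp [scanlAdd]
  | cons x rest ih =>
    intro s i hi
    cases i with
    | zero => simp [scanlAdd]
    | succ j =>
      simp only [scanlAdd, List.getD_cons_succ, List.take_succ_cons, List.sum_cons]
      rw [ih (s + x) j (by simpa using hi)]
      ring

theorem seg_sum (A : List Int) (lo hi : Nat) (h1 : lo ≤ hi) (_h2 : hi ≤ A.length) :
    ((A.drop lo).take (hi - lo)).sum = (A.take hi).sum - (A.take lo).sum := by
  have h : A.take hi = A.take lo ++ (A.drop lo).take (hi - lo) := by
    have e1 : hi = lo + (hi - lo) := by omega
    rw [e1, List.take_add]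
    have e2 : lo + (hi - lo) - lo = hi - lo := by omega
    rw [e2]
  rw [h, List.sum_append]; ring

theorem seg_len (A : List Int) (lo hi : Nat) (h2 : hi ≤ A.length) :
    ((A.drop lo).take (hi - lo)).length = hi - lo := by
  simp [List.length_take, List.length_drop]; omega

theorem sum_take_succ' (A : List Int) (m : Nat) (h : m < A.length) :
    (A.take (m + 1)).sum = (A.take m).sum + A[m] :=
  List.sum_take_succ A m h

theorem bScan_some (P : List Int) : ∀ (cnt i : Nat) (t : Int) (j : Nat),
    bScan P i cnt t = some j → i ≤ j ∧ j < i + cnt ∧ 2 * P.getD j 0 = t := by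
  intro cnt
  induction cnt with
  | zero => intro i t j h; simp [bScan] at h
  | succ c ih =>
    intro i t j h
    simp only [bScan] at h
    split at h
    · cases h; refine ⟨le_refl _, by omega, by assumption⟩
    · obtain ⟨h1, h2, h3⟩ := ih (i + 1) t j h
      exact ⟨by omega, by omega, h3⟩

theorem bScan_none (P : List Int) : ∀ (cnt i : Nat) (t : Int),
    bScan P i cnt t = none → ∀ j, i ≤ j → j < i + cnt → ¬(2 * P.getD j 0 = t) := by
  intro cnt
  induction cnt with
  | zero => intro i t _ j h1 h2; omega
  | succ c ih =>
    intro i t h j h1 h2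
    simp only [bScan] at h
    split at h
    · exact absurd h (by simp)
    · rcases Nat.eq_or_lt_of_le h1 with rfl | hlt
      · assumption
      · exact ih (i + 1) t h j (by omega) (by omega)

theorem firstSplit_some (P : List Int) (lo hi k : Nat)
    (h : firstSplit P lo hi = some k) : 2 ≤ hi - lo ∧ lo < k ∧ k < hi := by
  unfold firstSplit at h
  split at h
  · simp at h
  · have hb := bScan_some P (hi - (lo + 1)) (lo + 1) _ k h
    omega

-- proof-only helper: the per-segment score A computes, as a well-founded recursion
def scoreSeg (P : List Int) (lo hi : Nat) : Int :=
  match h : firstSplit P lo hi with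
  | none => 0
  | some k => 1 + max (scoreSeg P lo k) (scoreSeg P k hi)
termination_by hi - lo
decreasing_by
  · have := firstSplit_some P lo hi k h; omega
  · have := firstSplit_some P lo hi k h; omega

theorem scoreSeg_none (P : List Int) (lo hi : Nat) (h : firstSplit P lo hi = none) :
    scoreSeg P lo hi = 0 := by
  rw [scoreSeg, h]

theorem scoreSeg_split (P : List Int) (lo hi k : Nat) (h : firstSplit P lo hi = some k) :
    scoreSeg P lo hi = 1 + max (scoreSeg P lo k) (scoreSeg P k hi) := by
  rw [scoreSeg, h]

theorem scoreSeg_nonneg (P : List Int) : ∀ (n lo hi : Nat), hi - lo ≤ n →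
    0 ≤ scoreSeg P lo hi := by
  intro n
  induction n with
  | zero =>
    intro lo hi hle
    have : firstSplit P lo hi = none := by
      unfold firstSplit; rw [if_pos (by omega)]
    rw [scoreSeg_none P lo hi this]
  | succ m ih =>
    intro lo hi hle
    cases h : firstSplit P lo hi with
    | none => rw [scoreSeg_none P lo hi h]
    | some k =>
      have hb := firstSplit_some P lo hi k h
      rw [scoreSeg_split P lo hi k h]
      have h1 := ih lo k (by omega)
      have h2 := ih k hi (by omega)
      omega

-- the two scans agree (A's loop may additionally match at the segment's right end)
theorem corr_scan (A : List Int) (lo hi : Nat) (hhi : hi ≤ A.length) (hlohi : lo ≤ hi) :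
    ∀ (n m : Nat), hi - m = n → lo ≤ m → m ≤ hi →
    aLoop ((A.drop m).take (hi - m)) ((A.take m).sum - (A.take lo).sum)
        ((A.take hi).sum - (A.take m).sum) (m - lo)
    = match bScan (scanlAdd 0 A) (m + 1) (hi - (m + 1)) ((A.take lo).sum + (A.take hi).sum) with
      | some j => some (j - lo)
      | none =>
        if (A.take hi).sum = (A.take lo).sum ∧ m < hi then some (hi - lo) else none := by
  intro n
  induction n with
  | zero =>
    intro m hgen hlom hmhi
    have hm : m = hi := by omega
    subst hm
    simp [aLoop, bScan]
  | succ n ih =>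
    intro m hgen hlom hmhi
    have hmlt : m < hi := by omega
    have hmA : m < A.length := by omega
    have hdecomp : (A.drop m).take (hi - m) = A[m] :: (A.drop (m + 1)).take (hi - (m + 1)) := by
      rw [show hi - m = (hi - (m + 1)) + 1 by omega,
        List.drop_eq_getElem_cons hmA, List.take_succ_cons]
    rw [hdecomp]
    simp only [aLoop]
    have hsum : (A.take m).sum - (A.take lo).sum + A[m]
        = (A.take (m + 1)).sum - (A.take lo).sum := by
      rw [sum_take_succ' A m hmA]; ring
    have hsum2 : (A.take hi).sum - (A.take m).sum - A[m]
        = (A.take hi).sum - (A.take (m + 1)).sum := by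
      rw [sum_take_succ' A m hmA]; ring
    rw [hsum, hsum2]
    have hQ : (scanlAdd 0 A).getD (m + 1) 0 = (A.take (m + 1)).sum := by
      rw [scanlAdd_getD A 0 (m + 1) (by omega)]; ring
    by_cases hc : 2 * (A.take (m + 1)).sum = (A.take lo).sum + (A.take hi).sum
    · -- match at m+1
      rw [if_pos (by omega : (A.take (m+1)).sum - (A.take lo).sum = (A.take hi).sum - (A.take (m+1)).sum)]
      by_cases hend : m + 1 < hi
      · rw [show hi - (m + 1) = (hi - (m + 2)) + 1 by omega]
        simp only [bScan, hQ]
        rw [if_pos hc]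
        have : m - lo + 1 = m + 1 - lo := by omega
        simp [this]
      · -- m + 1 = hi: bScan sees nothing, but A's loop matches at the right end
        have hm1 : m + 1 = hi := by omega
        rw [show hi - (m + 1) = 0 by omega]
        simp only [bScan]
        have heq : (A.take hi).sum = (A.take lo).sum := by
          rw [← hm1] at hc ⊢; omega
        rw [if_pos ⟨heq, hmlt⟩]
        have : m - lo + 1 = hi - lo := by omega
        simp [this]
    · -- no match at m+1: step both scans
      rw [if_neg (by omega : ¬ ((A.take (m+1)).sum - (A.take lo).sum = (A.take hi).sum - (A.take (m+1)).sum))]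
      have hrec := ih (m + 1) (by omega) (by omega) (by omega)
      rw [show m - lo + 1 = m + 1 - lo by omega]
      rw [hrec]
      by_cases hend : m + 1 < hi
      · rw [show hi - (m + 1) = (hi - (m + 2)) + 1 by omega]
        simp only [bScan, hQ]
        rw [if_neg hc]
        cases hres : bScan (scanlAdd 0 A) (m + 2) (hi - (m + 2)) ((A.take lo).sum + (A.take hi).sum) with
        | some j => simp
        | none =>
          simp only []
          by_cases hz : (A.take hi).sum = (A.take lo).sum
          · rw [if_pos ⟨hz, by omega⟩, if_pos ⟨hz, hmlt⟩]
          · rw [if_neg (by tauto), if_neg (by tauto)]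
      · -- m + 1 = hi and no match: both none
        have hm1 : m + 1 = hi := by omega
        rw [show hi - (m + 1) = 0 by omega]
        simp only [bScan]
        have hz : ¬ ((A.take hi).sum = (A.take lo).sum) := by
          rw [← hm1] at hc ⊢; intro h; exact hc (by omega)
        rw [if_neg (by tauto), if_neg (by tauto)]
        rw [show hi - (m + 1 + 1) = 0 by omega]
        simp [bScan]

-- segment safety: the recursion stays inside segments on which A terminates
def SafeSeg (A : List Int) (lo hi : Nat) : Prop :=
  (A.take hi).sum ≠ (A.take lo).sum ∨ hi - lo < 2 ∨ ∀ x ∈ (A.drop lo).take (hi - lo), x = 0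

-- A on a safe segment computes scoreSeg of that segment
theorem main_corr (A : List Int) : ∀ (fuel lo hi : Nat), lo ≤ hi → hi ≤ A.length →
    hi - lo + 1 ≤ fuel → SafeSeg A lo hi →
    solutionF fuel ((A.drop lo).take (hi - lo)) = scoreSeg (scanlAdd 0 A) lo hi := by
  intro fuel
  induction fuel with
  | zero => intro lo hi _ _ hf _; omega
  | succ fuel ih =>
    intro lo hi hlohi hhi hf hsafe
    set L := (A.drop lo).take (hi - lo) with hL
    have hlen : L.length = hi - lo := seg_len A lo hi hhi
    simp only [solutionF, hlen]
    by_cases hsmall : hi - lo < 2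
    · rw [if_pos hsmall]
      rw [scoreSeg_none _ _ _ (by unfold firstSplit; rw [if_pos hsmall])]
    · rw [if_neg hsmall]
      have hQlo : (scanlAdd 0 A).getD lo 0 = (A.take lo).sum := by
        rw [scanlAdd_getD A 0 lo (by omega)]; ring
      have hQhi : (scanlAdd 0 A).getD hi 0 = (A.take hi).sum := by
        rw [scanlAdd_getD A 0 hi (by omega)]; ring
      have hFS : firstSplit (scanlAdd 0 A) lo hi
          = bScan (scanlAdd 0 A) (lo + 1) (hi - (lo + 1)) ((A.take lo).sum + (A.take hi).sum) := by
        unfold firstSplit; rw [if_neg hsmall, hQlo, hQhi]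
      have hsum : L.sum = (A.take hi).sum - (A.take lo).sum := seg_sum A lo hi hlohi hhi
      have hstart := corr_scan A lo hi hhi hlohi (hi - lo) lo rfl (le_refl lo) hlohi
      simp only [Nat.sub_self] at hstart
      have hzero : (A.take lo).sum - (A.take lo).sum = (0 : Int) := by ring
      rw [hzero] at hstart
      rw [hsum, hstart]
      cases hres : bScan (scanlAdd 0 A) (lo + 1) (hi - (lo + 1))
          ((A.take lo).sum + (A.take hi).sum) with
      | none =>
        simp only []
        by_cases hz : (A.take hi).sum = (A.take lo).sum
        · -- impossible under SafeSeg: the segment is all zeros, so index lo+1 matches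
          exfalso
          rcases hsafe with h | h | h
          · exact h hz
          · exact hsmall h
          · have hloA : lo < A.length := by omega
            have hmem : A[lo] ∈ L := by
              rw [hL, show hi - lo = (hi - (lo + 1)) + 1 by omega,
                List.drop_eq_getElem_cons hloA, List.take_succ_cons]
              exact List.mem_cons_self ..
            have hAlo : A[lo] = 0 := h _ hmem
            have hcond : 2 * (scanlAdd 0 A).getD (lo + 1) 0
                = (A.take lo).sum + (A.take hi).sum := by
              rw [scanlAdd_getD A 0 (lo + 1) (by omega)]
              rw [sum_take_succ' A lo hloA, hAlo, hz]; ring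
            exact bScan_none _ _ _ _ hres (lo + 1) (le_refl _) (by omega) hcond
        · rw [if_neg (by tauto)]
          rw [scoreSeg_none _ _ _ (by rw [hFS, hres])]
      | some j =>
        simp only []
        obtain ⟨hj1, hj2, hj3⟩ := bScan_some _ _ _ _ _ hres
        have hjhi : j < hi := by omega
        have hjlo : lo < j := by omega
        have hQj : (scanlAdd 0 A).getD j 0 = (A.take j).sum := by
          rw [scanlAdd_getD A 0 j (by omega)]; ring
        rw [hQj] at hj3
        -- the two sublists
        have htake : L.take (j - lo) = (A.drop lo).take (j - lo) := by
          rw [hL, List.take_take]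
          congr 1; omega
        have hdrop : L.drop (j - lo) = (A.drop j).take (hi - j) := by
          rw [hL, List.drop_take, List.drop_drop]
          rw [show hi - lo - (j - lo) = hi - j by omega, show lo + (j - lo) = j by omega]
        -- children are safe
        have hsafeL : SafeSeg A lo j := by
          rcases hsafe with h | h | h
          · left; intro hEq; rw [hEq] at hj3; omega
          · exact absurd h hsmall
          · right; right
            intro x hx
            refine h x ?_
            have : x ∈ L.take (j - lo) := by rw [htake]; exact hx
            exact List.mem_of_mem_take this
        have hsafeR : SafeSeg A j hi := by
          rcases hsafe with h | h | h
          · left; intro hEq; rw [hEq] at hj3; omega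
          · exact absurd h hsmall
          · right; right
            intro x hx
            refine h x ?_
            have : x ∈ L.drop (j - lo) := by rw [hdrop]; exact hx
            exact List.mem_of_mem_drop this
        have ih1 := ih lo j (by omega) (by omega) (by omega) hsafeL
        have ih2 := ih j hi (by omega) (by omega) (by omega) hsafeR
        rw [htake, hdrop, ih1, ih2]
        rw [scoreSeg_split (scanlAdd 0 A) lo hi j (by rw [hFS, hres])]

-- ===== BFS side: the level count computes the same scoreSeg =====

def childrenOf (P : List Int) (seg : Nat × Nat) : List (Nat × Nat) :=
  match firstSplit P seg.1 seg.2 with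
  | none => []
  | some k => [(seg.1, k), (k, seg.2)]

def stepFlat (P : List Int) (l : List (Nat × Nat)) : List (Nat × Nat) :=
  l.flatMap (childrenOf P)

theorem bStep_eq_flat (P : List Int) (l : List (Nat × Nat)) :
    bStep P l = stepFlat P l := by
  suffices h : ∀ acc, l.foldl (fun nxt seg =>
      match firstSplit P seg.1 seg.2 with
      | none => nxt
      | some k => nxt ++ [(seg.1, k), (k, seg.2)]) acc = acc ++ stepFlat P l by
    simpa [bStep] using h []
  induction l with
  | nil => intro acc; simp [stepFlat]
  | cons seg rest ih =>
    intro acc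
    simp only [List.foldl_cons]
    cases h : firstSplit P seg.1 seg.2 with
    | none =>
      rw [ih acc]
      simp [stepFlat, childrenOf, h]
    | some k =>
      rw [ih (acc ++ [(seg.1, k), (k, seg.2)])]
      simp [stepFlat, childrenOf, h]

-- max of scores over a frontier (0 for the empty frontier)
def gmax (P : List Int) (l : List (Nat × Nat)) : Int :=
  l.foldr (fun seg acc => max (scoreSeg P seg.1 seg.2) acc) 0

theorem gmax_nonneg (P : List Int) (l : List (Nat × Nat)) : 0 ≤ gmax P l := by
  induction l with
  | nil => simp [gmax]
  | cons seg rest ih =>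
    have := scoreSeg_nonneg P (seg.2 - seg.1) seg.1 seg.2 (le_refl _)
    simp only [gmax, List.foldr_cons] at *
    omega

theorem gmax_append (P : List Int) (l1 l2 : List (Nat × Nat)) :
    gmax P (l1 ++ l2) = max (gmax P l1) (gmax P l2) := by
  induction l1 with
  | nil =>
    have := gmax_nonneg P l2
    simp only [List.nil_append, gmax, List.foldr_nil] at *
    omega
  | cons seg rest ih =>
    simp only [List.cons_append, gmax, List.foldr_cons] at *
    omega

theorem gmax_stop (P : List Int) (l : List (Nat × Nat)) (h : stepFlat P l = []) :
    gmax P l = 0 := by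
  induction l with
  | nil => simp [gmax]
  | cons seg rest ih =>
    simp only [stepFlat, List.flatMap_cons, List.append_eq_nil_iff] at h
    obtain ⟨h1, h2⟩ := h
    have hfs : firstSplit P seg.1 seg.2 = none := by
      by_contra hne
      cases hcs : firstSplit P seg.1 seg.2 with
      | none => exact hne hcs
      | some k => simp [childrenOf, hcs] at h1
    have hz : scoreSeg P seg.1 seg.2 = 0 := scoreSeg_none _ _ _ hfs
    have := ih h2
    simp only [gmax, List.foldr_cons] at *
    omega

theorem gmax_level (P : List Int) (l : List (Nat × Nat)) (h : stepFlat P l ≠ []) :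
    gmax P l = 1 + gmax P (stepFlat P l) := by
  induction l with
  | nil => simp [stepFlat] at h
  | cons seg rest ih =>
    have hflat : stepFlat P (seg :: rest) = childrenOf P seg ++ stepFlat P rest := by
      simp [stepFlat]
    cases hfs : firstSplit P seg.1 seg.2 with
    | none =>
      have hch : childrenOf P seg = [] := by simp [childrenOf, hfs]
      have hrest : stepFlat P rest ≠ [] := by
        rw [hflat, hch] at h; simpa using h
      have hz : scoreSeg P seg.1 seg.2 = 0 := scoreSeg_none _ _ _ hfs
      have hih := ih hrest
      have hg := gmax_nonneg P (stepFlat P rest)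
      rw [hflat, hch, List.nil_append]
      simp only [gmax, List.foldr_cons] at *
      omega
    | some k =>
      have hch : childrenOf P seg = [(seg.1, k), (k, seg.2)] := by simp [childrenOf, hfs]
      have hsplit := scoreSeg_split P seg.1 seg.2 k hfs
      rw [hflat, hch]
      have happ := gmax_append P [(seg.1, k), (k, seg.2)] (stepFlat P rest)
      by_cases hrest : stepFlat P rest = []
      · have hr0 : gmax P rest = 0 := gmax_stop P rest hrest
        have hg1 := scoreSeg_nonneg P (k - seg.1) seg.1 k (le_refl _)
        have hg2 := scoreSeg_nonneg P (seg.2 - k) k seg.2 (le_refl _)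
        rw [hrest] at happ ⊢
        simp only [gmax, List.foldr_cons, List.foldr_nil, List.append_nil] at *
        omega
      · have hih := ih hrest
        have hg1 := scoreSeg_nonneg P (k - seg.1) seg.1 k (le_refl _)
        have hg2 := scoreSeg_nonneg P (seg.2 - k) k seg.2 (le_refl _)
        have hg := gmax_nonneg P (stepFlat P rest)
        simp only [gmax, List.foldr_cons, List.foldr_nil] at *
        omega

theorem bfs_correct (P : List Int) : ∀ (fuel : Nat) (frontier : List (Nat × Nat)) (score : Int),
    (∀ seg ∈ frontier, seg.2 - seg.1 < fuel) →
    bfs P fuel frontier score = score + gmax P frontier := by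
  intro fuel
  induction fuel with
  | zero =>
    intro frontier score hlen
    cases frontier with
    | nil => simp [bfs, gmax]
    | cons seg rest => exact absurd (hlen seg (List.mem_cons_self ..)) (by omega)
  | succ fuel ih =>
    intro frontier score hlen
    simp only [bfs]
    by_cases hemp : frontier.isEmpty
    · rw [if_pos hemp]
      rw [List.isEmpty_iff] at hemp
      subst hemp
      simp [gmax]
    · rw [if_neg hemp]
      rw [bStep_eq_flat]
      by_cases hnxt : (stepFlat P frontier).isEmpty
      · rw [if_pos hnxt]
        rw [List.isEmpty_iff] at hnxt
        rw [gmax_stop P frontier hnxt]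
        omega
      · rw [if_neg hnxt]
        rw [List.isEmpty_iff] at hnxt
        have hchild : ∀ seg ∈ stepFlat P frontier, seg.2 - seg.1 < fuel := by
          intro c hc
          simp only [stepFlat, List.mem_flatMap] at hc
          obtain ⟨p, hp, hcp⟩ := hc
          have hplen := hlen p hp
          cases hfs : firstSplit P p.1 p.2 with
          | none => simp [childrenOf, hfs] at hcp
          | some k =>
            have hb := firstSplit_some P p.1 p.2 k hfs
            simp only [childrenOf, hfs, List.mem_cons] at hcp
            rcases hcp with rfl | rfl | hfalse
            · simp only []; omega
            · simp only []; omega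
            · simp at hfalse
        rw [ih (stepFlat P frontier) (score + 1) hchild]
        rw [gmax_level P frontier hnxt]
        omega

-- ===== VERDICT (by name: the statement is the Claim_ definition above) =====
theorem solution_spec : Claim_equal_solution := by
  intro A _ hpre
  unfold Spec_solution solution solution_alt
  rw [buildP_eq]
  have hsafe : SafeSeg A 0 A.length := by
    unfold SafeSeg
    rcases hpre with h | h | h
    · left; simpa using h
    · right; left; omega
    · right; right; simpa using h
  have hA := main_corr A (A.length + 1) 0 A.length (by omega) (le_refl _) (by omega) hsafe
  have hB := bfs_correct (scanlAdd 0 A) (A.length + 1) [(0, A.length)] 0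
    (by intro seg hs; simp at hs; subst hs; simp)
  rw [hB]
  have : gmax (scanlAdd 0 A) [(0, A.length)] = scoreSeg (scanlAdd 0 A) 0 A.length := by
    have := scoreSeg_nonneg (scanlAdd 0 A) A.length 0 A.length (by omega)
    simp only [gmax, List.foldr_cons, List.foldr_nil]
    omega
  rw [this]
  simpa using hA

@[simp] theorem solution_raises : Claim_raises_solution := by
  unfold Claim_raises_solution
  constructor
  · intro A _ hr
    unfold Raises_solution at hr
    unfold Pre_solution
    rintro (h | h | h)
    · exact h hr.1
    · omega
    · exact hr.2.2 h
  · decide
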